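-- pv_equiv track=rewrite | github.com/zhuwenzhen/algorithms-practice | BinarySearch/WoodCut.py | woodCut
-- ===== SOURCE A (Python) =====
-- def woodCut(L, k):
--     # write your code here
--     if not L or sum(L) <= k or k <= 0:
--         return 0
--
--     def count_piece(wood_length):
--         num_pieces = 0
--         for length in L:
--             num_pieces += length // wood_length
--         return num_pieces
--
--     start, end = 1, max(L)
--     while start + 1 < end:
--         mid = (start + end) // 2
--         num_pieces = count_piece(mid)
--         if num_pieces >= k:
--             start = mid
--         else:
--             end = mid
--     if count_piece(end) >= k:
--         return end
--     if count_piece(start) >= k: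
--         return start
--     return 0
-- ===== SOURCE B (Python) =====
-- def woodCut(L, k):
--     # Same guard as the original; then build the answer bit by bit (binary lifting)
--     # instead of bisecting a (start, end) interval.
--     if not L or sum(L) <= k or k <= 0:
--         return 0
--     hi = max(L)
--     bit = 1
--     while bit * 2 <= hi:
--         bit *= 2
--     g = 0
--     while bit:
--         if sum(w // (g + bit) for w in L) >= k:
--             g += bit
--         bit //= 2
--     return g
-- ===== Notes on version B (the rewrite author's own statement) =====
-- stated objective: alternative
-- what changed: Replaces the (start,end) interval-bisection loop with its midpoint and two post-loop feasibility checks by a top-down bitwise greedy construction of the answer (binary lifting): find the highest power of two not above max(L), then set each bit of the answer from high to low if the candidate still yields at least k pieces; the early-return guard is kept verbatim.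
-- outside the precondition, e.g. on woodCut([2, -7, 9, 8], 1): A returns 4, B returns 8
import Mathlib
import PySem

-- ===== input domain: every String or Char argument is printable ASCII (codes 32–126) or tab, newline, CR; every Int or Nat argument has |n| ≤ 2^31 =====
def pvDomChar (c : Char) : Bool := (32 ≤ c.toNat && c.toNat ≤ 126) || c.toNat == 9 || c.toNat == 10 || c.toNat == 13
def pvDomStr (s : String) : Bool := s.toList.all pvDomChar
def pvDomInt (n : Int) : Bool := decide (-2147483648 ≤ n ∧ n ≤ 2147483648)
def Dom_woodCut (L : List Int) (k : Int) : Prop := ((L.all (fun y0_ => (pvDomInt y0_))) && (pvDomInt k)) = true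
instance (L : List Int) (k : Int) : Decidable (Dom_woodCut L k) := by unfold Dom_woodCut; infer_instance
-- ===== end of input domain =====

-- B replaces the interval bisection by a top-down bitwise greedy construction of the
-- answer (binary lifting); the early-return guard is kept verbatim.

-- ===== PORT A =====

-- count_piece: accumulator loop over L
def wcCount (L : List Int) (wood_length : Int) : Int :=
  L.foldl (fun num_pieces length => num_pieces + PySem.Int.floordiv length wood_length) 0

-- the 'while start + 1 < end' binary-search loop; returns the final (start, end)
def wcLoop (L : List Int) (k : Int) (start e : Int) : Int × Int :=
  if _h : start + 1 < e then
    let mid := PySem.Int.floordiv (start + e) 2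
    if k ≤ wcCount L mid then wcLoop L k mid e else wcLoop L k start mid
  else (start, e)
termination_by (e - start).toNat
decreasing_by
  · simp only [PySem.Int.floordiv_eq_ediv_of_pos (by norm_num : (0:Int) < 2)]
    omega
  · simp only [PySem.Int.floordiv_eq_ediv_of_pos (by norm_num : (0:Int) < 2)]
    omega

def woodCut (L : List Int) (k : Int) : Int :=
  if L = [] ∨ L.sum ≤ k ∨ k ≤ 0 then 0
  else
    match PySem.List.max? L id with
    | none => 0  -- unreachable: L ≠ [] here
    | some mx =>
      let p := wcLoop L k 1 mx
      if k ≤ wcCount L p.2 then p.2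
      else if k ≤ wcCount L p.1 then p.1
      else 0

-- ===== PORT B =====

-- sum(w // length for w in L)
def wcCountB (L : List Int) (length : Int) : Int :=
  (L.map (fun w => PySem.Int.floordiv w length)).sum

-- 'while bit * 2 <= hi: bit *= 2'  (the 0 < bit conjunct only makes the recursion
-- well-founded; it holds on every reachable state since the loop starts at bit = 1)
def wcTopBit (hi bit : Int) : Int :=
  if _h : 0 < bit ∧ bit * 2 ≤ hi then wcTopBit hi (bit * 2) else bit
termination_by (hi - bit).toNat
decreasing_by omega

-- 'while bit: …; bit //= 2'  ('while bit' with bit ≥ 0 reachable is 0 < bit)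
def wcBits (L : List Int) (k : Int) (bit g : Int) : Int :=
  if _h : 0 < bit then
    wcBits L k (PySem.Int.floordiv bit 2)
      (if k ≤ wcCountB L (g + bit) then g + bit else g)
  else g
termination_by bit.toNat
decreasing_by
  simp only [PySem.Int.floordiv_eq_ediv_of_pos (by norm_num : (0:Int) < 2)]
  omega

def woodCut_alt (L : List Int) (k : Int) : Int :=
  if L = [] ∨ L.sum ≤ k ∨ k ≤ 0 then 0
  else
    match PySem.List.max? L id with
    | none => 0  -- unreachable: L ≠ [] here
    | some hi => wcBits L k (wcTopBit hi 1) 0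

-- ===== PRECONDITION & SPEC =====
-- Pre_ restricts to the task's natural domain of nonnegative wood lengths: on lists with a
-- negative element the piece count is not antitone in the candidate length, so neither
-- search's invariant holds and the two searches can land on different feasible lengths.
def Pre_woodCut (L : List Int) (k : Int) : Prop := ∀ x ∈ L, 0 ≤ x
instance (L : List Int) (k : Int) : Decidable (Pre_woodCut L k) := by unfold Pre_woodCut; infer_instance

def pvWitness_woodCut : List Int × Int := ([5, 5, 2], 3)

def Spec_woodCut (L : List Int) (k : Int) (out : Int) : Prop := out = woodCut_alt L k
instance (L : List Int) (k : Int) (out : Int) : Decidable (Spec_woodCut L k out) := by unfold Spec_woodCut; infer_instance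

-- ===== CLAIM (what is proved, stated in full; the proofs are below) =====
def Claim_equal_woodCut : Prop := ∀ (L : List Int) (k : Int), Dom_woodCut L k → Pre_woodCut L k → Spec_woodCut L k (woodCut L k)

-- ===== LEMMAS AND PROOFS =====

-- A's accumulator count equals B's map-sum count
theorem wcCount_eq_foldl_aux (f : Int → Int) (L : List Int) (init : Int) :
    L.foldl (fun a w => a + f w) init = init + (L.map f).sum := by
  induction L generalizing init with
  | nil => simp
  | cons w t ih => simp [List.foldl_cons, ih]; ring

theorem wcCount_eq (L : List Int) (wl : Int) : wcCount L wl = wcCountB L wl := by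
  unfold wcCount wcCountB
  simpa using wcCount_eq_foldl_aux (fun w => PySem.Int.floordiv w wl) L 0

theorem wcCountB_one (L : List Int) : wcCountB L 1 = L.sum := by
  unfold wcCountB
  have h1 : ∀ w : Int, PySem.Int.floordiv w 1 = w := by
    intro w
    rw [PySem.Int.floordiv_eq_ediv_of_pos (by norm_num : (0:Int) < 1), Int.ediv_one]
  simp only [h1, List.map_id_fun', id]

theorem fdiv_antitone {w a b : Int} (hw : 0 ≤ w) (ha : 0 < a) (hab : a ≤ b) :
    PySem.Int.floordiv w b ≤ PySem.Int.floordiv w a := by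
  have hb : 0 < b := lt_of_lt_of_le ha hab
  rw [PySem.Int.floordiv_eq_ediv_of_pos ha, PySem.Int.floordiv_eq_ediv_of_pos hb]
  have hq : 0 ≤ w / b := Int.ediv_nonneg hw (le_of_lt hb)
  have h1 : w / b * b ≤ w := Int.ediv_mul_le w (by omega)
  have h2 : w / b * a ≤ w / b * b := mul_le_mul_of_nonneg_left hab hq
  exact (Int.le_ediv_iff_mul_le ha).mpr (le_trans h2 h1)

theorem wcCountB_antitone {L : List Int} {a b : Int} (hL : ∀ x ∈ L, 0 ≤ x)
    (ha : 0 < a) (hab : a ≤ b) : wcCountB L b ≤ wcCountB L a := by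
  induction L with
  | nil => simp [wcCountB]
  | cons w t ih =>
    have hw : 0 ≤ w := hL w (by simp)
    have ht : wcCountB t b ≤ wcCountB t a := ih (fun x hx => hL x (by simp [hx]))
    have hhd := fdiv_antitone hw ha hab
    simp only [wcCountB, List.map_cons, List.sum_cons] at *
    omega

-- beyond the longest wood every quotient is 0
theorem wcCountB_zero_of_gt_max {L : List Int} {mx ℓ : Int} (hpre : ∀ x ∈ L, 0 ≤ x)
    (hmax : ∀ y ∈ L, y ≤ mx) (hℓ : mx < ℓ) : wcCountB L ℓ = 0 := by
  unfold wcCountB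
  apply List.sum_eq_zero
  intro x hx
  rw [List.mem_map] at hx
  obtain ⟨w, hwL, hwx⟩ := hx
  have hw0 : 0 ≤ w := hpre w hwL
  have hwmx : w ≤ mx := hmax w hwL
  have hpos : (0:Int) < ℓ := by omega
  rw [← hwx, PySem.Int.floordiv_eq_ediv_of_pos hpos]
  exact Int.ediv_eq_zero_of_lt hw0 (by omega)

-- the doubling loop returns a power of two b with bit ≤ b and hi < 2*b
theorem wcTopBit_props (hi : Int) :
    ∀ (n : Nat) (bit : Int), (hi - bit).toNat ≤ n → 1 ≤ bit → (∃ s : Nat, bit = 2 ^ s) →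
      (∃ t : Nat, wcTopBit hi bit = 2 ^ t) ∧ bit ≤ wcTopBit hi bit ∧ hi < wcTopBit hi bit * 2 := by
  intro n
  induction n with
  | zero =>
    intro bit hn h1 hs
    have hstop : ¬ (0 < bit ∧ bit * 2 ≤ hi) := by omega
    rw [wcTopBit]; simp only [dif_neg hstop]
    exact ⟨hs, le_refl bit, by omega⟩
  | succ n ih =>
    intro bit hn h1 hs
    by_cases hgo : 0 < bit ∧ bit * 2 ≤ hi
    · rw [wcTopBit]; simp only [dif_pos hgo]
      obtain ⟨s, hseq⟩ := hs
      obtain ⟨ht, hle, hlt⟩ := ih (bit * 2) (by omega) (by omega)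
        ⟨s + 1, by rw [hseq, pow_succ]⟩
      exact ⟨ht, by omega, hlt⟩
    · rw [wcTopBit]; simp only [dif_neg hgo]
      exact ⟨hs, le_refl bit, by omega⟩

-- the greedy bit loop: from a state (g feasible-or-zero, everything ≥ g + 2*bit
-- infeasible) it reaches the maximal feasible value
theorem wcBits_props (L : List Int) (k : Int) (hpre : ∀ x ∈ L, 0 ≤ x) :
    ∀ (t : Nat) (g : Int), 0 ≤ g →
      (g = 0 ∨ k ≤ wcCountB L g) →
      (∀ ℓ, g + 2 * 2 ^ t ≤ ℓ → g + 1 ≤ ℓ → wcCountB L ℓ < k) →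
      (wcBits L k (2 ^ t) g = 0 ∨ k ≤ wcCountB L (wcBits L k (2 ^ t) g)) ∧
      (∀ ℓ, wcBits L k (2 ^ t) g + 1 ≤ ℓ → wcCountB L ℓ < k) ∧
      g ≤ wcBits L k (2 ^ t) g := by
  intro t
  induction t with
  | zero =>
    intro g hg0 ha hb
    rw [wcBits]
    simp only [pow_zero, dif_pos (by norm_num : (0:Int) < 1)]
    have hdiv : PySem.Int.floordiv (1:Int) 2 = 0 := by
      rw [PySem.Int.floordiv_eq_ediv_of_pos (by norm_num : (0:Int) < 2)]
      norm_num
    rw [hdiv, wcBits]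
    simp only [dif_neg (by norm_num : ¬ (0:Int) < 0)]
    by_cases hc : k ≤ wcCountB L (g + 1)
    · simp only [if_pos hc]
      refine ⟨Or.inr hc, ?_, by omega⟩
      intro ℓ hℓ
      exact hb ℓ (by omega) (by omega)
    · simp only [if_neg hc]
      refine ⟨ha, ?_, le_refl g⟩
      intro ℓ hℓ
      have := wcCountB_antitone hpre (by omega : (0:Int) < g + 1) (by omega : g + 1 ≤ ℓ)
      omega
  | succ t ih =>
    intro g hg0 ha hb
    have hp : (0:Int) < 2 ^ (t + 1) := by positivity
    have hps : ((2:Int) ^ (t + 1)) = 2 * 2 ^ t := by ring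
    rw [wcBits]
    simp only [dif_pos hp]
    have hdiv : PySem.Int.floordiv ((2:Int) ^ (t + 1)) 2 = 2 ^ t := by
      rw [PySem.Int.floordiv_eq_ediv_of_pos (by norm_num : (0:Int) < 2), hps,
        Int.mul_ediv_cancel_left _ (by norm_num : (2:Int) ≠ 0)]
    rw [hdiv]
    have hpt : (0:Int) < 2 ^ t := by positivity
    by_cases hc : k ≤ wcCountB L (g + 2 ^ (t + 1))
    · simp only [if_pos hc]
      have hb' : ∀ ℓ, g + 2 ^ (t + 1) + 2 * 2 ^ t ≤ ℓ → g + 2 ^ (t + 1) + 1 ≤ ℓ →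
          wcCountB L ℓ < k := by
        intro ℓ h1 h2
        exact hb ℓ (by omega) (by omega)
      obtain ⟨ra, rb, rc⟩ := ih (g + 2 ^ (t + 1)) (by omega) (Or.inr hc) hb'
      exact ⟨ra, rb, by omega⟩
    · simp only [if_neg hc]
      refine ih g hg0 ha ?_
      intro ℓ h1 h2
      have := wcCountB_antitone hpre (by omega : (0:Int) < g + 2 ^ (t + 1))
        (by omega : g + 2 ^ (t + 1) ≤ ℓ)
      omega

-- the binary-search loop keeps g = the maximal feasible length inside [start, end]
theorem wcLoop_props (L : List Int) (k g mx : Int)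
    (hiff : ∀ ℓ, 1 ≤ ℓ → ℓ ≤ mx → (k ≤ wcCount L ℓ ↔ ℓ ≤ g)) :
    ∀ (n : Nat) (s e : Int), (e - s).toNat ≤ n → 1 ≤ s → s ≤ g → g ≤ e → e ≤ mx →
      (wcLoop L k s e).1 ≤ g ∧ g ≤ (wcLoop L k s e).2 ∧ (wcLoop L k s e).2 ≤ mx ∧
      1 ≤ (wcLoop L k s e).1 ∧ (wcLoop L k s e).2 ≤ (wcLoop L k s e).1 + 1 := by
  intro n
  induction n with
  | zero =>
    intro s e hn h1 h2 h3 h4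
    have hse : ¬ (s + 1 < e) := by omega
    rw [wcLoop]; simp only [dif_neg hse]
    exact ⟨h2, h3, h4, h1, by omega⟩
  | succ n ih =>
    intro s e hn h1 h2 h3 h4
    by_cases hse : s + 1 < e
    · rw [wcLoop]; simp only [dif_pos hse]
      have hmid : s < PySem.Int.floordiv (s + e) 2 ∧ PySem.Int.floordiv (s + e) 2 < e := by
        rw [PySem.Int.floordiv_eq_ediv_of_pos (by norm_num : (0:Int) < 2)]
        omega
      set mid := PySem.Int.floordiv (s + e) 2 with hmiddef
      by_cases hc : k ≤ wcCount L mid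
      · simp only [if_pos hc]
        have hmg : mid ≤ g := (hiff mid (by omega) (by omega)).mp hc
        exact ih mid e (by omega) (by omega) hmg h3 h4
      · simp only [if_neg hc]
        have hgm : g < mid := by
          by_contra hgm
          exact hc ((hiff mid (by omega) (by omega)).mpr (by omega))
        exact ih s mid (by omega) h1 h2 (by omega) (by omega)
    · rw [wcLoop]; simp only [dif_neg hse]
      exact ⟨h2, h3, h4, h1, by omega⟩

theorem sum_zero_of_max_nonpos {L : List Int} (hpre : ∀ x ∈ L, 0 ≤ x) {mx : Int}
    (hmax : ∀ y ∈ L, y ≤ mx) (hmx : mx ≤ 0) : L.sum = 0 := by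
  apply List.sum_eq_zero
  intro x hx
  have := hpre x hx
  have := hmax x hx
  omega

-- ===== VERDICT (by name: the statement is the Claim_ definition above) =====
theorem woodCut_spec : Claim_equal_woodCut := by
  intro L k _hdom hpre
  unfold Spec_woodCut woodCut woodCut_alt
  by_cases hguard : L = [] ∨ L.sum ≤ k ∨ k ≤ 0
  · simp [hguard]
  · simp only [if_neg hguard]
    rw [not_or, not_or] at hguard
    obtain ⟨hne, hsum, hk⟩ := hguard
    cases hmx : PySem.List.max? L id with
    | none => exact absurd ((PySem.List.max?_eq_none_iff L id).mp hmx) hne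
    | some mx =>
      dsimp only
      have hmax : ∀ y ∈ L, y ≤ mx := by
        have := PySem.List.max?_isMax hmx
        simpa using this
      have hmx1 : 1 ≤ mx := by
        by_contra h
        have := sum_zero_of_max_nonpos hpre hmax (by omega)
        omega
      have hP1 : k ≤ wcCountB L 1 := by rw [wcCountB_one]; omega
      -- B's side: the top bit, then the greedy bit loop
      obtain ⟨⟨t, hteq⟩, hble, hblt⟩ :=
        wcTopBit_props mx (mx - 1).toNat 1 (by omega) (by omega) ⟨0, by norm_num⟩
      have h2t : (0:Int) < 2 ^ t := by positivity
      rw [hteq] at hble hblt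
      have hb0 : ∀ ℓ, (0:Int) + 2 * 2 ^ t ≤ ℓ → (0:Int) + 1 ≤ ℓ → wcCountB L ℓ < k := by
        intro ℓ h1 _h2
        rw [wcCountB_zero_of_gt_max hpre hmax (by omega)]
        omega
      obtain ⟨hr0, hrinf, hrge⟩ := wcBits_props L k hpre t 0 (le_refl 0) (Or.inl rfl) hb0
      rw [hteq]
      set g := wcBits L k (2 ^ t) 0 with hgdef
      have hgfeas : k ≤ wcCountB L g := by
        rcases hr0 with h | h
        · exact absurd hP1 (by have := hrinf 1 (by omega); omega)
        · exact h
      have hg1 : 1 ≤ g := by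
        by_contra h
        exact absurd hP1 (by have := hrinf 1 (by omega); omega)
      have hgmx : g ≤ mx := by
        by_contra h
        have := wcCountB_zero_of_gt_max hpre hmax (by omega : mx < g)
        omega
      have hiff : ∀ ℓ, 1 ≤ ℓ → ℓ ≤ mx → (k ≤ wcCount L ℓ ↔ ℓ ≤ g) := by
        intro ℓ hℓ1 _hℓmx
        rw [wcCount_eq]
        constructor
        · intro hkc
          by_contra hgl
          exact absurd hkc (by have := hrinf ℓ (by omega); omega)
        · intro hlg
          have := wcCountB_antitone hpre hℓ1 hlg
          omega
      obtain ⟨hp1, hp2, hp3, hp4, hp5⟩ :=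
        wcLoop_props L k g mx hiff (mx - 1).toNat 1 mx (by omega) (le_refl 1) hg1 hgmx (le_refl mx)
      set p := wcLoop L k 1 mx with hpdef
      by_cases hge : g = p.2
      · have : k ≤ wcCount L p.2 := (hiff p.2 (by omega) hp3).mpr (by omega)
        simp only [if_pos this]
        omega
      · have hlt : ¬ k ≤ wcCount L p.2 := by
          intro h
          have := (hiff p.2 (by omega) hp3).mp h
          omega
        have : k ≤ wcCount L p.1 := (hiff p.1 hp4 (by omega)).mpr (by omega)
        simp only [if_neg hlt, if_pos this]
        omega
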